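-- pv_equiv track=rewrite | github.com/codekansas/xax | xax/utils/launcher/gpu_visibility.py | _extract_queue_args_from_cmdline
-- ===== SOURCE A (Python) =====
-- def _extract_queue_args_from_cmdline(cmdline: list[str]) -> tuple[str | None, int | None]:
--     queue_gpus: str | None = None
--     queue_num_gpus: int | None = None
--     idx = 0
--     while idx < len(cmdline):
--         token = cmdline[idx]
--         if token.startswith("--queue-gpus="):
--             queue_gpus = token.split("=", maxsplit=1)[1]
--         elif token == "--queue-gpus" and idx + 1 < len(cmdline):
--             queue_gpus = cmdline[idx + 1]
--             idx += 1
--         elif token.startswith("--queue-num-gpus="):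
--             queue_num_gpus = int(token.split("=", maxsplit=1)[1])
--         elif token == "--queue-num-gpus" and idx + 1 < len(cmdline):
--             queue_num_gpus = int(cmdline[idx + 1])
--             idx += 1
--         idx += 1
--     return queue_gpus, queue_num_gpus
-- ===== SOURCE B (Python) =====
-- def _extract_queue_args_from_cmdline(cmdline: list[str]) -> tuple[str | None, int | None]:
--     # Stage 1: tokenize into (key, value) assignment events with a pending-flag state machine.
--     events: list[tuple[str, str]] = []
--     pending: str | None = None
--     for token in cmdline:
--         if pending is not None:
--             events.append((pending, token))
--             pending = None
--         elif token.startswith("--queue-gpus="):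
--             events.append(("gpus", token.split("=", maxsplit=1)[1]))
--         elif token == "--queue-gpus":
--             pending = "gpus"
--         elif token.startswith("--queue-num-gpus="):
--             events.append(("num", token.split("=", maxsplit=1)[1]))
--         elif token == "--queue-num-gpus":
--             pending = "num"
--     # Stage 2: last occurrence wins via dict(); int() applied once at the end.
--     last = dict(events)
--     num = last.get("num")
--     return last.get("gpus"), None if num is None else int(num)
-- ===== Notes on version B (the rewrite author's own statement) =====
-- stated objective: alternative
-- what changed: Two staged passes instead of A's single index-walking loop with inline assignment: a pending-flag state machine first tokenizes the command line into a list of (key, value) assignment events (no index arithmetic, no skip), then dict(events) reduces them with last-occurrence-wins and int() is applied once to the final value.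
import Mathlib
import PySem

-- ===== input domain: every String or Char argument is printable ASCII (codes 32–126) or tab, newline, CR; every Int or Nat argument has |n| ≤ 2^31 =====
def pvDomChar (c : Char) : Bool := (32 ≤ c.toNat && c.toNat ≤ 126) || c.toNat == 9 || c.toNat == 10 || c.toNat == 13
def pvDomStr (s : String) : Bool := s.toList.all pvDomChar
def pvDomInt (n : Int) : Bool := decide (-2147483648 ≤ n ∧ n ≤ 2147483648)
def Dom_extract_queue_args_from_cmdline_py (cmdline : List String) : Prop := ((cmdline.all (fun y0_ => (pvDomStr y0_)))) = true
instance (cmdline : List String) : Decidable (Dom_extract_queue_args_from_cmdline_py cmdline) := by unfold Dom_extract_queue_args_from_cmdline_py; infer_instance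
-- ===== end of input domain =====

-- B replaces A's single index-walking loop by two staged passes: a pending-flag state machine
-- tokenizes the command line into (key, value) assignment events, then dict(events) reduces them
-- last-wins and int() is applied once at the end; objective: alternative (same cost).

-- ===== PORT A =====
-- token.split("=", maxsplit=1)[1]; both defaults are unreachable when the token contains "="
def pvSplitEq1 (token : String) : String :=
  (PySem.List.pyGet? ((PySem.Str.splitMax? token "=" 1).getD []) 1).getD ""

-- the while-loop of A, recursing on idx; int(...) failures (Python ValueError) are excluded by
-- Pre_, so the .getD 0 default is never reached on admitted inputs
def goA (cmdline : List String) (qg : Option String) (qn : Option Int) (idx : Nat) :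
    Option String × Option Int :=
  if h : idx < cmdline.length then
    let token := cmdline[idx]
    if PySem.Str.startswith token "--queue-gpus=" then
      goA cmdline (some (pvSplitEq1 token)) qn (idx + 1)
    else if token == "--queue-gpus" then
      -- short-circuit 'and idx + 1 < len(cmdline)': when false, no later elif matches this token
      if h2 : idx + 1 < cmdline.length then
        goA cmdline (some cmdline[idx + 1]) qn (idx + 2)
      else
        goA cmdline qg qn (idx + 1)
    else if PySem.Str.startswith token "--queue-num-gpus=" then
      goA cmdline qg (some ((PySem.Int.ofStr? (pvSplitEq1 token)).getD 0)) (idx + 1)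
    else if token == "--queue-num-gpus" then
      if h2 : idx + 1 < cmdline.length then
        goA cmdline qg (some ((PySem.Int.ofStr? cmdline[idx + 1]).getD 0)) (idx + 2)
      else
        goA cmdline qg qn (idx + 1)
    else
      goA cmdline qg qn (idx + 1)
  else
    (qg, qn)
termination_by cmdline.length - idx

def extract_queue_args_from_cmdline_py (cmdline : List String) : Option String × Option Int :=
  goA cmdline none none 0

-- ===== PORT B =====
-- stage 1 of Source B: the for-loop with state (events, pending): a token arriving while a bare flag
-- is pending becomes that flag's value event; otherwise the elif chain emits an event or sets
-- pending; a pending left at the end of the list produces no event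
def goB : List String → List (String × String) → Option String → List (String × String)
  | [], events, _ => events
  | token :: rest, events, pending =>
    match pending with
    | some k => goB rest (events ++ [(k, token)]) none
    | none =>
      if PySem.Str.startswith token "--queue-gpus=" then
        goB rest (events ++ [("gpus", pvSplitEq1 token)]) none
      else if token == "--queue-gpus" then
        goB rest events (some "gpus")
      else if PySem.Str.startswith token "--queue-num-gpus=" then
        goB rest (events ++ [("num", pvSplitEq1 token)]) none
      else if token == "--queue-num-gpus" then
        goB rest events (some "num")
      else
        goB rest events none

-- stage 2 of Source B: last = dict(events); int applied once to the final "num" value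
def extract_queue_args_from_cmdline_py_alt (cmdline : List String) : Option String × Option Int :=
  let last := PySem.Dict.ofList (goB cmdline [] none)
  (last.get? "gpus", (last.get? "num").map (fun v => (PySem.Int.ofStr? v).getD 0))

-- ===== PRECONDITION & SPEC =====
-- Pre_ excludes the inputs on which int() raises ValueError in A: any token of the form
-- "--queue-num-gpus=<bad>" or any token immediately following a "--queue-num-gpus" token whose
-- value part does not parse as a Python int.  This is slightly conservative: a token consumed as
-- the VALUE of a preceding flag is never itself parsed (e.g. ["--queue-gpus",
-- "--queue-num-gpus=abc"] returns normally in A and B but is excluded here).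
def Pre_extract_queue_args_from_cmdline_py (cmdline : List String) : Prop :=
  (cmdline.all (fun t =>
      !(PySem.Str.startswith t "--queue-num-gpus=") || (PySem.Int.ofStr? (pvSplitEq1 t)).isSome)
    && (cmdline.zip cmdline.tail).all (fun p =>
      !(p.1 == "--queue-num-gpus") || (PySem.Int.ofStr? p.2).isSome)) = true
instance (cmdline : List String) : Decidable (Pre_extract_queue_args_from_cmdline_py cmdline) := by
  unfold Pre_extract_queue_args_from_cmdline_py; infer_instance

def pvWitness_extract_queue_args_from_cmdline_py : List String :=
  ["--queue-gpus=0,1", "--queue-num-gpus", "2", "x"]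

def Spec_extract_queue_args_from_cmdline_py (cmdline : List String) (out : Option String × Option Int) : Prop := out = extract_queue_args_from_cmdline_py_alt cmdline
instance (cmdline : List String) (out : Option String × Option Int) : Decidable (Spec_extract_queue_args_from_cmdline_py cmdline out) := by unfold Spec_extract_queue_args_from_cmdline_py; infer_instance

-- ===== CLAIM =====
def Claim_equal_extract_queue_args_from_cmdline_py : Prop := ∀ (cmdline : List String), Dom_extract_queue_args_from_cmdline_py cmdline → Pre_extract_queue_args_from_cmdline_py cmdline → Spec_extract_queue_args_from_cmdline_py cmdline (extract_queue_args_from_cmdline_py cmdline)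

-- ===== LEMMAS AND PROOFS =====
-- the clean (accumulator-free) event list of a token list: the elif chain of stage 1, with the
-- bare-flag branches pairing the flag with the following token
def ev : List String → List (String × String)
  | [] => []
  | t :: rest =>
    if PySem.Str.startswith t "--queue-gpus=" then ("gpus", pvSplitEq1 t) :: ev rest
    else if t == "--queue-gpus" then
      (rest.head?.map (fun v => ("gpus", v))).toList ++ ev rest.tail
    else if PySem.Str.startswith t "--queue-num-gpus=" then ("num", pvSplitEq1 t) :: ev rest
    else if t == "--queue-num-gpus" then
      (rest.head?.map (fun v => ("num", v))).toList ++ ev rest.tail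
    else ev rest
termination_by l => l.length
decreasing_by all_goals (simp [List.length_tail]; try omega)

-- applying an event list to the pair of accumulators as A interprets it
def applyE (es : List (String × String)) (st : Option String × Option Int) :
    Option String × Option Int :=
  es.foldl (fun st e =>
    (if e.1 = "gpus" then some e.2 else st.1,
     if e.1 = "num" then some ((PySem.Int.ofStr? e.2).getD 0) else st.2)) st

-- stage 1 computes exactly the clean event list (appended to the accumulator)
theorem goB_eq : ∀ (l : List String) (acc : List (String × String)) (p : Option String),
    goB l acc p = acc ++ (match p with
      | none => ev l
      | some k => match l with
        | [] => []
        | v :: r => (k, v) :: ev r) := by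
  intro l
  induction l with
  | nil => intro acc p; cases p <;> simp [goB, ev]
  | cons t rest ih =>
    intro acc p
    cases p with
    | some k =>
      rw [goB.eq_def]
      simp only [ih]
      simp
    | none =>
      rw [goB.eq_def]
      simp only []
      split_ifs with h1 h2 h3 h4
      · rw [ih, ev, if_pos h1]; simp
      · rw [ih, ev, if_neg h1, if_pos h2]
        cases rest <;> simp [ev]
      · rw [ih, ev, if_neg h1, if_neg h2, if_pos h3]; simp
      · rw [ih, ev, if_neg h1, if_neg h2, if_neg h3, if_pos h4]
        cases rest <;> simp [ev]
      · rw [ih, ev, if_neg h1, if_neg h2, if_neg h3, if_neg h4]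

-- A's index loop from position idx applies the events of the remaining suffix
theorem goA_eq (cmdline : List String) (idx : Nat) (qg : Option String) (qn : Option Int) :
    goA cmdline qg qn idx = applyE (ev (cmdline.drop idx)) (qg, qn) := by
  rw [goA]
  by_cases h : idx < cmdline.length
  · rw [dif_pos h, List.drop_eq_getElem_cons h, ev]
    by_cases h1 : PySem.Str.startswith cmdline[idx] "--queue-gpus=" = true
    · rw [if_pos h1, if_pos h1, goA_eq cmdline (idx + 1)]
      simp [applyE]
    · rw [if_neg h1, if_neg h1]
      by_cases h2 : (cmdline[idx] == "--queue-gpus") = true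
      · rw [if_pos h2, if_pos h2]
        by_cases h5 : idx + 1 < cmdline.length
        · rw [dif_pos h5, goA_eq cmdline (idx + 2), List.drop_eq_getElem_cons h5]
          simp [applyE, Nat.add_assoc, List.getElem?_eq_getElem h5]
        · have hdrop : cmdline.drop (idx + 1) = [] := List.drop_eq_nil_of_le (by omega)
          rw [dif_neg h5, goA_eq cmdline (idx + 1), hdrop]
          simp [applyE, ev]
      · rw [if_neg h2, if_neg h2]
        by_cases h3 : PySem.Str.startswith cmdline[idx] "--queue-num-gpus=" = true
        · rw [if_pos h3, if_pos h3, goA_eq cmdline (idx + 1)]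
          simp [applyE]
        · rw [if_neg h3, if_neg h3]
          by_cases h4 : (cmdline[idx] == "--queue-num-gpus") = true
          · rw [if_pos h4, if_pos h4]
            by_cases h5 : idx + 1 < cmdline.length
            · rw [dif_pos h5, goA_eq cmdline (idx + 2), List.drop_eq_getElem_cons h5]
              simp [applyE, Nat.add_assoc, List.getElem?_eq_getElem h5]
            · have hdrop : cmdline.drop (idx + 1) = [] := List.drop_eq_nil_of_le (by omega)
              rw [dif_neg h5, goA_eq cmdline (idx + 1), hdrop]
              simp [applyE, ev]
          · rw [if_neg h4, if_neg h4]
            exact goA_eq cmdline (idx + 1) qg qn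
  · rw [dif_neg h, List.drop_eq_nil_of_le (by omega)]
    simp [applyE, ev]
termination_by cmdline.length - idx

-- dict(events) last-wins lookups compute applyE from (none, none), for any event list
theorem dict_eq_applyE (es : List (String × String)) :
    ((PySem.Dict.ofList es).get? "gpus",
      ((PySem.Dict.ofList es).get? "num").map (fun v => (PySem.Int.ofStr? v).getD 0))
      = applyE es (none, none) := by
  induction es using List.reverseRecOn with
  | nil => simp [PySem.Dict.ofList, PySem.Dict.update, applyE]
  | append_singleton es e ih =>
    have hof : PySem.Dict.ofList (es ++ [e]) = (PySem.Dict.ofList es).insert e.1 e.2 := by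
      simp [PySem.Dict.ofList, PySem.Dict.update]
    have happ : applyE (es ++ [e]) (none, none)
        = ((if e.1 = "gpus" then some e.2 else (applyE es (none, none)).1),
           (if e.1 = "num" then some ((PySem.Int.ofStr? e.2).getD 0)
            else (applyE es (none, none)).2)) := by
      simp [applyE]
    rw [hof, happ, ← ih]
    rw [PySem.Dict.get?_insert, PySem.Dict.get?_insert]
    by_cases hg : e.1 = "gpus"
    · by_cases hn : e.1 = "num"
      · exact absurd (hg.symm.trans hn) (by decide)
      · simp [hg]
    · by_cases hn : e.1 = "num"
      · simp [hn, eq_comm]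
      · simp [Ne.symm hg, Ne.symm hn]
        exact ⟨fun hx => absurd hx hg, fun hx => absurd hx hn⟩

-- ===== VERDICT =====
theorem extract_queue_args_from_cmdline_py_spec : Claim_equal_extract_queue_args_from_cmdline_py := by
  intro cmdline _ _
  unfold Spec_extract_queue_args_from_cmdline_py extract_queue_args_from_cmdline_py
    extract_queue_args_from_cmdline_py_alt
  have h1 : goA cmdline none none 0 = applyE (ev cmdline) (none, none) := by
    simpa using goA_eq cmdline 0 none none
  have h2 : goB cmdline [] none = ev cmdline := by
    simpa using goB_eq cmdline [] none
  rw [h1, h2]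
  exact (dict_eq_applyE (ev cmdline)).symm
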